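-- pv_equiv track=rewrite | github.com/Lanerra/saga | core/langgraph/subgraphs/validation.py | _events_are_related
-- ===== SOURCE A (Python) =====
-- def _events_are_related(event1: str, event2: str) -> bool:
--     """
--     Check if two events are related (share key terms).
--
--     Simple heuristic: events are related if they share significant words.
--     """
--     # Extract significant words (> 4 chars, not common words)
--     common_words = {
--         "that",
--         "this",
--         "with",
--         "from",
--         "have",
--         "were",
--         "been",
--         "they",
--         "their",
--     }
--
--     words1 = {
--         w.lower()
--         for w in event1.split()
--         if len(w) > 4 and w.lower() not in common_words
--     }
--     words2 = {
--         w.lower()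
--         for w in event2.split()
--         if len(w) > 4 and w.lower() not in common_words
--     }
--
--     overlap = words1 & words2
--     return len(overlap) >= 2
-- ===== SOURCE B (Python) =====
-- def _events_are_related(event1: str, event2: str) -> bool:
--     """Sort-and-merge re-implementation: build the sorted lists of significant
--     lowered tokens of each event (duplicates kept), then count distinct common
--     words with a two-pointer merge that skips duplicate runs, returning True at
--     the second shared word.  No set intersection is performed."""
--     common_words = {
--         "that",
--         "this",
--         "with",
--         "from",
--         "have",
--         "were",
--         "been",
--         "they",
--         "their",
--     }
--
--     def sig_sorted(event: str) -> list:
--         out = []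
--         for w in event.split():
--             lw = w.lower()
--             if len(w) > 4 and lw not in common_words:
--                 out.append(lw)
--         out.sort()
--         return out
--
--     a = sig_sorted(event1)
--     b = sig_sorted(event2)
--     shared = 0
--     i = j = 0
--     while i < len(a) and j < len(b):
--         x, y = a[i], b[j]
--         if x == y:
--             shared += 1
--             if shared >= 2:
--                 return True
--             while i < len(a) and a[i] == x:
--                 i += 1
--             while j < len(b) and b[j] == y:
--                 j += 1
--         elif x < y:
--             i += 1
--         else:
--             j += 1
--     return False
-- ===== Notes on version B (the rewrite author's own statement) =====
-- stated objective: alternative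
-- what changed: B replaces A's two hash-set constructions and set intersection with sorting the lists of significant lowered tokens of each event and a two-pointer merge that skips duplicate runs and returns True at the second distinct shared word.
import Mathlib
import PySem

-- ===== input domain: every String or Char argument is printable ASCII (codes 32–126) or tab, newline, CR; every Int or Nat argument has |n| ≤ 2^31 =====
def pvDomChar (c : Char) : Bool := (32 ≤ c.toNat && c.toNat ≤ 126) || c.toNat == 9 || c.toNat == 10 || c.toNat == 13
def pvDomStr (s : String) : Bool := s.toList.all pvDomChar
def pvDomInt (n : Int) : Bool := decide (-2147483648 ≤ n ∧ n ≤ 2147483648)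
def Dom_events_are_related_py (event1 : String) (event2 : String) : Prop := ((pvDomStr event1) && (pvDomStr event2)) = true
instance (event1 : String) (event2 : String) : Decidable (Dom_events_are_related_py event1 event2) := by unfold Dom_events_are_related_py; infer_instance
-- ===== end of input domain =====

-- B replaces A's two hash-set constructions and set intersection by sorting each event's
-- list of significant lowered tokens and counting distinct shared words with a two-pointer
-- merge that skips duplicate runs (alternative decomposition, not claimed faster).

-- ===== PORT A =====
-- the common_words set literal and the comprehension's filter condition
def pvCommonWords : PySem.Set String :=
  PySem.Set.ofList ["that", "this", "with", "from", "have", "were", "been", "they", "their"]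

def pvSig (w : String) : Bool :=
  decide (4 < PySem.Str.len w) && !(PySem.Set.contains pvCommonWords (PySem.Str.lower w))

-- the set comprehension {w.lower() for w in e.split() if len(w) > 4 and w.lower() not in common_words}
def pvWords (e : String) : PySem.Set String :=
  PySem.Set.ofList (((PySem.Str.split₀ e).filter pvSig).map PySem.Str.lower)

def events_are_related_py (event1 : String) (event2 : String) : Bool :=
  let words1 := pvWords event1
  let words2 := pvWords event2
  let overlap := PySem.Set.inter words1 words2
  decide (2 ≤ PySem.Set.len overlap)

-- ===== PORT B =====
-- sig_sorted: collect the significant lowered tokens (duplicates kept), then .sort()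
def pvSigSorted (e : String) : List String :=
  PySem.List.sorted (((PySem.Str.split₀ e).filter pvSig).map PySem.Str.lower) (fun x => x) false

-- the two-pointer merge over the two sorted lists; on a match it counts once and
-- skips the whole duplicate run on both sides (the two inner while loops)
def pvMerge : List String → List String → Nat → Bool
  | [], _, _ => false
  | _ :: _, [], _ => false
  | x :: as, y :: bs, shared =>
    if x = y then
      if 2 ≤ shared + 1 then true
      else pvMerge ((x :: as).dropWhile (· == x)) ((y :: bs).dropWhile (· == y)) (shared + 1)
    else if x < y then pvMerge as (y :: bs) shared
    else pvMerge (x :: as) bs shared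
termination_by a b _ => a.length + b.length
decreasing_by
  · have h1 : ((x :: as).dropWhile (· == x)).length ≤ as.length := by
      simp
      exact List.length_dropWhile_le _ _
    have h2 : ((y :: bs).dropWhile (· == y)).length ≤ bs.length := by
      simp
      exact List.length_dropWhile_le _ _
    simp only [List.length_cons]; omega
  · simp only [List.length_cons]; omega
  · simp only [List.length_cons]; omega

def events_are_related_py_alt (event1 : String) (event2 : String) : Bool :=
  pvMerge (pvSigSorted event1) (pvSigSorted event2) 0

-- ===== PRECONDITION & SPEC =====
def Spec_events_are_related_py (event1 : String) (event2 : String) (out : Bool) : Prop := out = events_are_related_py_alt event1 event2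
instance (event1 : String) (event2 : String) (out : Bool) : Decidable (Spec_events_are_related_py event1 event2 out) := by unfold Spec_events_are_related_py; infer_instance

-- ===== CLAIM (what is proved, stated in full; the proofs are below) =====
def Claim_equal_events_are_related_py : Prop := ∀ (event1 : String) (event2 : String), Dom_events_are_related_py event1 event2 → Spec_events_are_related_py event1 event2 (events_are_related_py event1 event2)

-- ===== LEMMAS AND PROOFS =====

-- dropping the duplicate run of x from a sorted list whose elements are all ≥ x:
-- x is gone, sortedness is kept, and the elements only lose x
theorem pvDropRun (l : List String) (x : String)
    (hs : l.Pairwise (· ≤ ·)) (hb : ∀ z ∈ l, x ≤ z) :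
    x ∉ l.dropWhile (· == x) ∧ (l.dropWhile (· == x)).Pairwise (· ≤ ·) ∧
      (∀ z ∈ l, z = x ∨ z ∈ l.dropWhile (· == x)) ∧
      (∀ z ∈ l.dropWhile (· == x), z ∈ l) := by
  induction l with
  | nil => simp
  | cons h t ih =>
    by_cases hx : h = x
    · have ht := List.pairwise_cons.mp hs
      obtain ⟨hnot, hpw, hfwd, hbwd⟩ := ih ht.2 (fun z hz => hx ▸ ht.1 z hz)
      have hd : (h :: t).dropWhile (· == x) = t.dropWhile (· == x) := by
        simp [hx]
      refine ⟨by rw [hd]; exact hnot, by rw [hd]; exact hpw, ?_, ?_⟩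
      · intro z hz
        rw [hd]
        rcases List.mem_cons.mp hz with rfl | hz
        · exact Or.inl hx
        · exact hfwd z hz
      · intro z hz
        rw [hd] at hz
        exact List.mem_cons_of_mem _ (hbwd z hz)
    · have hbe : (h == x) = false := by simp [hx]
      have hd : (h :: t).dropWhile (· == x) = h :: t := by
        simp [hbe]
      rw [hd]
      refine ⟨?_, hs, fun z hz => Or.inr hz, fun z hz => hz⟩
      intro hmem
      rcases List.mem_cons.mp hmem with rfl | hmt
      · exact hx rfl
      · have h1 : h ≤ x := (List.pairwise_cons.mp hs).1 x hmt
        have h2 : x ≤ h := hb h List.mem_cons_self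
        exact hx (le_antisymm h1 h2)

-- the merge with early exit counts distinct common elements of two sorted lists
theorem pvMerge_eq : ∀ (a b : List String) (c : Nat),
    a.Pairwise (· ≤ ·) → b.Pairwise (· ≤ ·) → c ≤ 1 →
    pvMerge a b c = decide (2 ≤ c + (a.toFinset ∩ b.toFinset).card) := by
  intro a b c
  induction a, b, c using pvMerge.induct with
  | case1 b c => intro _ _ hc; simp [pvMerge]; omega
  | case2 x as c => intro _ _ hc; simp [pvMerge]; omega
  | case3 as y bs c hret =>
    -- equal heads, second match: return true; the intersection is nonempty
    intro _ _ hc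
    have hcx : y ∈ (y :: as).toFinset ∩ (y :: bs).toFinset := by simp
    have hpos : 0 < ((y :: as).toFinset ∩ (y :: bs).toFinset).card :=
      Finset.card_pos.mpr ⟨y, hcx⟩
    rw [show pvMerge (y :: as) (y :: bs) c = true from by simp [pvMerge, hret],
      eq_comm, decide_eq_true_iff]
    omega
  | case4 as y bs c hret ih =>
    -- equal heads, first match: count it and skip the duplicate runs on both sides
    intro ha hb hc
    have hc0 : c = 0 := by omega
    subst hc0
    have hba : ∀ z ∈ y :: as, y ≤ z := by
      intro z hz
      rcases List.mem_cons.mp hz with rfl | hz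
      · exact le_refl _
      · exact (List.pairwise_cons.mp ha).1 z hz
    have hbb : ∀ z ∈ y :: bs, y ≤ z := by
      intro z hz
      rcases List.mem_cons.mp hz with rfl | hz
      · exact le_refl _
      · exact (List.pairwise_cons.mp hb).1 z hz
    obtain ⟨hna, hpa, hfa, hga⟩ := pvDropRun (y :: as) y ha hba
    obtain ⟨hnb, hpb, hfb, hgb⟩ := pvDropRun (y :: bs) y hb hbb
    have hcard : ((y :: as).toFinset ∩ (y :: bs).toFinset).card
        = 1 + (((y :: as).dropWhile (· == y)).toFinset ∩
               ((y :: bs).dropWhile (· == y)).toFinset).card := by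
      have hset : (y :: as).toFinset ∩ (y :: bs).toFinset
          = insert y (((y :: as).dropWhile (· == y)).toFinset ∩
                      ((y :: bs).dropWhile (· == y)).toFinset) := by
        ext z
        simp only [Finset.mem_inter, Finset.mem_insert, List.mem_toFinset]
        constructor
        · rintro ⟨hza, hzb⟩
          rcases hfa z hza with rfl | hza'
          · exact Or.inl rfl
          · rcases hfb z hzb with rfl | hzb'
            · exact Or.inl rfl
            · exact Or.inr ⟨hza', hzb'⟩
        · rintro (rfl | ⟨hza, hzb⟩)
          · exact ⟨List.mem_cons_self, List.mem_cons_self⟩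
          · exact ⟨hga z hza, hgb z hzb⟩
      rw [hset, Finset.card_insert_of_notMem (by
        simp only [Finset.mem_inter, List.mem_toFinset, not_and]
        intro hza _
        exact absurd hza hna)]
      omega
    rw [show pvMerge (y :: as) (y :: bs) 0
        = pvMerge ((y :: as).dropWhile (· == y)) ((y :: bs).dropWhile (· == y)) 1 from by
      simp [pvMerge, hret]]
    rw [ih hpa hpb (by omega), hcard, decide_eq_decide]
    omega
  | case5 x as y bs c hne hlt ih =>
    -- x < y: x cannot occur in the second list
    intro ha hb hc
    have hx : ∀ z ∈ y :: bs, x < z := by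
      intro z hz
      rcases List.mem_cons.mp hz with rfl | hz
      · exact hlt
      · exact lt_of_lt_of_le hlt ((List.pairwise_cons.mp hb).1 z hz)
    have hset : (x :: as).toFinset ∩ (y :: bs).toFinset
        = as.toFinset ∩ (y :: bs).toFinset := by
      ext z
      simp only [Finset.mem_inter, List.mem_toFinset, List.mem_cons]
      constructor
      · rintro ⟨rfl | hz, hzb⟩
        · exact absurd (hx z (List.mem_cons.mpr hzb)) (lt_irrefl z)
        · exact ⟨hz, hzb⟩
      · rintro ⟨hz, hzb⟩; exact ⟨Or.inr hz, hzb⟩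
    rw [show pvMerge (x :: as) (y :: bs) c = pvMerge as (y :: bs) c from by
      simp [pvMerge, hne, hlt]]
    rw [ih (List.pairwise_cons.mp ha).2 hb hc, hset]
  | case6 x as y bs c hne hlt ih =>
    -- y < x: y cannot occur in the first list
    intro ha hb hc
    have hyx : y < x := lt_of_le_of_ne (not_lt.mp hlt) (fun h => hne h.symm)
    have hy : ∀ z ∈ x :: as, y < z := by
      intro z hz
      rcases List.mem_cons.mp hz with rfl | hz
      · exact hyx
      · exact lt_of_lt_of_le hyx ((List.pairwise_cons.mp ha).1 z hz)
    have hset : (x :: as).toFinset ∩ (y :: bs).toFinset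
        = (x :: as).toFinset ∩ bs.toFinset := by
      ext z
      simp only [Finset.mem_inter, List.mem_toFinset, List.mem_cons]
      constructor
      · rintro ⟨hza, rfl | hz⟩
        · exact absurd (hy z (List.mem_cons.mpr hza)) (lt_irrefl z)
        · exact ⟨hza, hz⟩
      · rintro ⟨hza, hz⟩; exact ⟨hza, Or.inr hz⟩
    rw [show pvMerge (x :: as) (y :: bs) c = pvMerge (x :: as) bs c from by
      simp [pvMerge, hne, hlt]]
    rw [ih ha (List.pairwise_cons.mp hb).2 hc, hset]

-- A's intersection length as a Finset cardinality
def pvMatchSet (ws1 : PySem.Set String) (toks : List String) : Finset String :=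
  ((toks.filter pvSig).map PySem.Str.lower).toFinset ∩ ws1.toFinset

theorem pvInter_card (ws1 : PySem.Set String) (hn : ws1.Nodup) (toks : List String) :
    (PySem.Set.inter ws1
        (PySem.Set.ofList ((toks.filter pvSig).map PySem.Str.lower))).length
      = (pvMatchSet ws1 toks).card := by
  have hfn : (ws1.filter
      (fun x => PySem.Set.contains
        (PySem.Set.ofList ((toks.filter pvSig).map PySem.Str.lower)) x)).Nodup :=
    hn.filter _
  have : PySem.Set.inter ws1
      (PySem.Set.ofList ((toks.filter pvSig).map PySem.Str.lower))
      = ws1.filter (fun x => PySem.Set.contains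
          (PySem.Set.ofList ((toks.filter pvSig).map PySem.Str.lower)) x) := rfl
  rw [this, ← List.toFinset_card_of_nodup hfn]
  congr 1
  rw [List.toFinset_filter]
  unfold pvMatchSet
  ext x
  simp [PySem.Set.mem_ofList]
  tauto

-- the sorted significant-token list and the word set have the same elements
theorem pvSigSorted_toFinset (e : String) :
    (pvSigSorted e).toFinset
      = (((PySem.Str.split₀ e).filter pvSig).map PySem.Str.lower).toFinset := by
  ext z
  simp only [List.mem_toFinset]
  exact (PySem.List.sorted_perm _ _ _).mem_iff

theorem pvWords_toFinset (e : String) :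
    (pvWords e).toFinset
      = (((PySem.Str.split₀ e).filter pvSig).map PySem.Str.lower).toFinset := by
  ext z
  simp [pvWords, PySem.Set.mem_ofList]

-- ===== VERDICT (by name: the statement is the Claim_ definition above) =====
theorem events_are_related_py_spec : Claim_equal_events_are_related_py := by
  intro event1 event2 _
  unfold Spec_events_are_related_py
  unfold events_are_related_py events_are_related_py_alt
  rw [pvMerge_eq (pvSigSorted event1) (pvSigSorted event2) 0
    (by exact PySem.List.sorted_pairwise _ _)
    (by exact PySem.List.sorted_pairwise _ _) (by omega)]
  show decide (2 ≤ PySem.Set.len (PySem.Set.inter (pvWords event1) (pvWords event2))) = _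
  unfold PySem.Set.len
  rw [show pvWords event2
      = PySem.Set.ofList (((PySem.Str.split₀ event2).filter pvSig).map PySem.Str.lower) from rfl,
    pvInter_card (pvWords event1) (PySem.Set.nodup_ofList _) (PySem.Str.split₀ event2)]
  have hset : pvMatchSet (pvWords event1) (PySem.Str.split₀ event2)
      = (pvSigSorted event1).toFinset ∩ (pvSigSorted event2).toFinset := by
    unfold pvMatchSet
    rw [pvWords_toFinset, pvSigSorted_toFinset, pvSigSorted_toFinset, Finset.inter_comm]
  rw [hset, decide_eq_decide]
  constructor
  · intro hc
    have : 2 ≤ ((pvSigSorted event1).toFinset ∩ (pvSigSorted event2).toFinset).card := by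
      exact_mod_cast hc
    omega
  · intro hc
    exact_mod_cast (by omega :
      2 ≤ ((pvSigSorted event1).toFinset ∩ (pvSigSorted event2).toFinset).card)
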